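-- pv_equiv track=rewrite | github.com/pypi-data/pypi-mirror-401 | packages/TD2/td2-1.0.8.tar.gz/td2-1.0.8/TD2/get_tables.py | add_ambiguous_codons
-- ===== SOURCE A (Python) =====
-- from itertools import product
--
-- def add_ambiguous_codons(data, verbose=False):
--     """Update the translation table by adding possible ambiguous codons."""
--
--     amb2std = ambiguous_to_standard()
--
--     # generate all possible 3-letter codons using IUPAC codes
--     iupac_bases = list(amb2std.keys())
--     all_combinations = [''.join(codon) for codon in product(iupac_bases, repeat=3)]
--
--     def expand_ambiguous_codon(codon):
--         """Expand an ambiguous codon into all possible standard codons it can represent."""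
--         return [''.join(bases) for bases in product(*[amb2std[nuc] for nuc in codon])]
--
--     def generate_ambiguous_translation_dict(codon_to_amino_acid):
--         """Generate a dictionary of ambiguous codons that map to a single amino acid."""
--         ambiguous_translation_dict = {}
--
--         for ambiguous_codon in all_combinations:
--             expanded_codons = expand_ambiguous_codon(ambiguous_codon)
--
--             # find the corresponding amino acid for each expanded codon
--             amino_acids = {codon_to_amino_acid[codon] for codon in expanded_codons if codon in codon_to_amino_acid}
--
--             # if all expanded codons map to the same amino acid, add to the dictionary
--             if len(amino_acids) == 1:
--                 ambiguous_translation_dict[ambiguous_codon] = amino_acids.pop()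
--
--         return ambiguous_translation_dict
--
--     # generate the final translation dictionary
--     updated_data = generate_ambiguous_translation_dict(data['codons'])
--     data['codons'] = updated_data
--
--     return data
--
-- def ambiguous_to_standard():
--     return {
--         'A': ['A'], 'C': ['C'], 'G': ['G'], 'T': ['T'],
--         'R': ['A', 'G'], 'Y': ['C', 'T'], 'S': ['G', 'C'],
--         'W': ['A', 'T'], 'K': ['G', 'T'], 'M': ['A', 'C'],
--         'B': ['C', 'G', 'T'], 'D': ['A', 'G', 'T'],
--         'H': ['A', 'C', 'T'], 'V': ['A', 'C', 'G'],
--         'N': ['A', 'C', 'G', 'T']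
--     }
-- ===== SOURCE B (Python) =====
-- def add_ambiguous_codons(data, verbose=False):
--     """Update the translation table by adding possible ambiguous codons."""
--     amb2std = ambiguous_to_standard()
--
--     # invert the table: for each standard base, the IUPAC codes that cover it
--     std2amb = {}
--     for amb, stds in amb2std.items():
--         for s in stds:
--             std2amb.setdefault(s, []).append(amb)
--
--     def generalizations(codon):
--         """All ambiguous codons whose expansion contains this standard codon."""
--         if len(codon) != 3 or any(ch not in std2amb for ch in codon):
--             return []
--         return [g1 + g2 + g3
--                 for g1 in std2amb[codon[0]]
--                 for g2 in std2amb[codon[1]]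
--                 for g3 in std2amb[codon[2]]]
--
--     # single pass over the TABLE: push each entry's amino acid up to every
--     # ambiguous codon generalizing it, tracking the first value and conflicts
--     val = {}
--     conflicted = set()
--     for codon, aa in data['codons'].items():
--         for amb in generalizations(codon):
--             if amb not in val:
--                 val[amb] = aa
--             elif val[amb] != aa:
--                 conflicted.add(amb)
--
--     # emit in the canonical IUPAC triple order
--     result = {}
--     for b1 in amb2std:
--         for b2 in amb2std:
--             for b3 in amb2std:
--                 amb = b1 + b2 + b3
--                 if amb in val and amb not in conflicted:
--                     result[amb] = val[amb]
--     data['codons'] = result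
--     return data
--
-- def ambiguous_to_standard():
--     return {
--         'A': ['A'], 'C': ['C'], 'G': ['G'], 'T': ['T'],
--         'R': ['A', 'G'], 'Y': ['C', 'T'], 'S': ['G', 'C'],
--         'W': ['A', 'T'], 'K': ['G', 'T'], 'M': ['A', 'C'],
--         'B': ['C', 'G', 'T'], 'D': ['A', 'G', 'T'],
--         'H': ['A', 'C', 'T'], 'V': ['A', 'C', 'G'],
--         'N': ['A', 'C', 'G', 'T']
--     }
-- ===== Notes on version B (the rewrite author's own statement) =====
-- stated objective: alternative
-- what changed: Reversed the traversal: instead of enumerating all 3375 ambiguous codons and expanding each against the table, B inverts the base table once and makes a single pass over the table's entries, pushing each amino acid up to the ambiguous codons that generalize its codon (first-value dict plus a conflict set), then emits unconflicted codons in canonical order.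
import Mathlib
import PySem

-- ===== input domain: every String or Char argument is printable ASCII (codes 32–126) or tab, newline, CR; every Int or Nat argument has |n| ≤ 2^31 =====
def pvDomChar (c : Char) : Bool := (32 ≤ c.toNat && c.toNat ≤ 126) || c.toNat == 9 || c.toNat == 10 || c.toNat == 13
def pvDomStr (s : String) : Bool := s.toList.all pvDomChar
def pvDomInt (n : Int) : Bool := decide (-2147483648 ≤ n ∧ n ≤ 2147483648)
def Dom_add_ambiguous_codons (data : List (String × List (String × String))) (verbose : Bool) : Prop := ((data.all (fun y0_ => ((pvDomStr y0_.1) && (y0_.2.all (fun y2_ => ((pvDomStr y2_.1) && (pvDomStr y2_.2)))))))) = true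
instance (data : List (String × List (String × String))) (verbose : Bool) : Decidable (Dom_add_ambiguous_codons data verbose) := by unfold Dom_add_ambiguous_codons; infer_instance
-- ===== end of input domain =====

-- B inverts the traversal: instead of enumerating all 3375 ambiguous codons and expanding each
-- against the table, it makes ONE pass over the table's entries, pushing each amino acid up to
-- the ambiguous codons generalizing that entry's codon (first value + conflict set), and then
-- emits the unconflicted ones in canonical order (objective: alternative algorithm).
-- Both Pythons mutate data['codons'] in place and return data (the same object); the equivalence
-- proved here is about the returned value.

-- ===== PORT A =====

-- ambiguous_to_standard() (shared module helper, called by both versions)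
def pvAmb2std : PySem.Dict String (List String) :=
  PySem.Dict.ofList [("A", ["A"]), ("C", ["C"]), ("G", ["G"]), ("T", ["T"]),
    ("R", ["A", "G"]), ("Y", ["C", "T"]), ("S", ["G", "C"]),
    ("W", ["A", "T"]), ("K", ["G", "T"]), ("M", ["A", "C"]),
    ("B", ["C", "G", "T"]), ("D", ["A", "G", "T"]),
    ("H", ["A", "C", "T"]), ("V", ["A", "C", "G"]),
    ("N", ["A", "C", "G", "T"])]

def pvIupacBases : List String := pvAmb2std.keys

-- itertools.product over a list of pools (A calls product(iupac_bases, repeat=3) and product(*pools))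
def pvProduct : List (List String) → List (List String)
  | [] => [[]]
  | pool :: rest => pool.flatMap (fun x => (pvProduct rest).map (fun tl => x :: tl))

-- [''.join(codon) for codon in product(iupac_bases, repeat=3)]
def pvAllCombinations : List String :=
  (pvProduct [pvIupacBases, pvIupacBases, pvIupacBases]).map (fun cs => PySem.Str.join "" cs)

-- expand_ambiguous_codon; amb2std[nuc] never misses (every nuc of A's codons is a key), so getD's
-- default is never taken
def pvExpandAmbiguousCodon (codon : String) : List String :=
  (pvProduct (codon.toList.map (fun nuc => pvAmb2std.getD (String.ofList [nuc]) []))).map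
    (fun cs => PySem.Str.join "" cs)

-- loop body of generate_ambiguous_translation_dict; amino_acids.pop() on the singleton set is its
-- sole element (headD, guarded by length = 1)
def pvStepA (cod : PySem.Dict String String) (acc : PySem.Dict String String)
    (ambiguousCodon : String) : PySem.Dict String String :=
  let expanded := pvExpandAmbiguousCodon ambiguousCodon
  let aminoAcids : PySem.Set String :=
    expanded.foldl (fun s c => if cod.contains c then PySem.Set.add s (cod.getD c "") else s)
      PySem.Set.empty
  if aminoAcids.length = 1 then acc.insert ambiguousCodon (aminoAcids.headD "") else acc

def add_ambiguous_codons (data : List (String × List (String × String))) (verbose : Bool) :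
    List (String × List (String × String)) :=
  let d := PySem.Dict.ofList data
  let cod := PySem.Dict.ofList (d.getD "codons" [])   -- data['codons']; Pre_ guards the KeyError
  let updated := pvAllCombinations.foldl (pvStepA cod) PySem.Dict.empty
  (d.insert "codons" updated.items).items

-- ===== PORT B =====

-- x + y + z on strings (ported via PySem.Str.join, exact for concatenation)
def pvCat3 (x y z : String) : String := PySem.Str.join "" [x, y, z]

-- std2amb: the inverted table; setdefault(s, []).append(amb) = insert s (getD s [] ++ [amb])
-- (overwrite keeps position, a fresh key appends — exactly Python's setdefault-then-append)
def pvStd2amb : PySem.Dict String (List String) :=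
  pvAmb2std.items.foldl
    (fun d p => p.2.foldl (fun d s => d.insert s (d.getD s [] ++ [p.1])) d) PySem.Dict.empty

-- generalizations(codon): the length/membership guard becomes the 3-element pattern plus the
-- three contains checks; codon[i] (a 1-char string) is String.ofList [ch]
def pvGeneralizations (codon : String) : List String :=
  match codon.toList with
  | [x, y, z] =>
    if pvStd2amb.contains (String.ofList [x]) && pvStd2amb.contains (String.ofList [y]) &&
        pvStd2amb.contains (String.ofList [z]) then
      (pvStd2amb.getD (String.ofList [x]) []).flatMap (fun g1 =>
        (pvStd2amb.getD (String.ofList [y]) []).flatMap (fun g2 =>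
          (pvStd2amb.getD (String.ofList [z]) []).map (fun g3 => pvCat3 g1 g2 g3)))
    else []
  | _ => []

-- body of B's push loop: first value wins, a differing later value marks a conflict
def pvPush (aa : String) (st : PySem.Dict String String × PySem.Set String) (amb : String) :
    PySem.Dict String String × PySem.Set String :=
  if st.1.contains amb = false then (st.1.insert amb aa, st.2)
  else if st.1.getD amb "" ≠ aa then (st.1, PySem.Set.add st.2 amb) else st

def add_ambiguous_codons_alt (data : List (String × List (String × String))) (verbose : Bool) :
    List (String × List (String × String)) :=
  let d := PySem.Dict.ofList data
  let cod : PySem.Dict String String := PySem.Dict.ofList (d.getD "codons" [])   -- data['codons']; Pre_ guards the KeyError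
  let vc := cod.items.foldl (fun st p => (pvGeneralizations p.1).foldl (pvPush p.2) st)
      (PySem.Dict.empty, PySem.Set.empty)
  let result := pvIupacBases.foldl (fun acc b1 =>
      pvIupacBases.foldl (fun acc b2 =>
        pvIupacBases.foldl (fun acc b3 =>
          if vc.1.contains (pvCat3 b1 b2 b3) && !(vc.2.contains (pvCat3 b1 b2 b3)) then
            acc.insert (pvCat3 b1 b2 b3) (vc.1.getD (pvCat3 b1 b2 b3) "")
          else acc) acc) acc)
    PySem.Dict.empty
  (d.insert "codons" result.items).items

-- ===== PRECONDITION & SPEC =====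
-- Pre_ excludes exactly the inputs without a 'codons' key, on which both Pythons raise KeyError.
def Pre_add_ambiguous_codons (data : List (String × List (String × String))) (verbose : Bool) : Prop :=
  "codons" ∈ data.map Prod.fst
instance (data : List (String × List (String × String))) (verbose : Bool) : Decidable (Pre_add_ambiguous_codons data verbose) := by unfold Pre_add_ambiguous_codons; infer_instance

def pvWitness_add_ambiguous_codons : (List (String × List (String × String))) × Bool :=
  ([("codons", [("AAA", "K"), ("AAG", "K"), ("AAT", "N")]), ("starts", [("ATG", "M")])], false)

def Spec_add_ambiguous_codons (data : List (String × List (String × String))) (verbose : Bool) (out : List (String × List (String × String))) : Prop := out = add_ambiguous_codons_alt data verbose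
instance (data : List (String × List (String × String))) (verbose : Bool) (out : List (String × List (String × String))) : Decidable (Spec_add_ambiguous_codons data verbose out) := by unfold Spec_add_ambiguous_codons; infer_instance

-- ===== CLAIM (what is proved, stated in full; the proofs are below) =====
def Claim_equal_add_ambiguous_codons : Prop := ∀ (data : List (String × List (String × String))) (verbose : Bool), Dom_add_ambiguous_codons data verbose → Pre_add_ambiguous_codons data verbose → Spec_add_ambiguous_codons data verbose (add_ambiguous_codons data verbose)

-- ===== LEMMAS AND PROOFS =====

-- the 3375 (b1, b2, b3) triples, in the order both versions enumerate them
def pvTrips : List (String × String × String) :=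
  pvIupacBases.flatMap (fun b1 =>
    pvIupacBases.flatMap (fun b2 => pvIupacBases.map (fun b3 => (b1, b2, b3))))

def pvPool (b : String) : List String := pvAmb2std.getD b []

-- the expansion of a triple, flattened
def pvExpB (b1 b2 b3 : String) : List String :=
  (pvPool b1).flatMap (fun x =>
    (pvPool b2).flatMap (fun y => (pvPool b3).map (fun z => pvCat3 x y z)))

-- the amino acids A's inner loop collects for one ambiguous codon, in expansion order
def pvMatchesA (cod : PySem.Dict String String) (amb : String) : List String :=
  (pvExpandAmbiguousCodon amb).filterMap cod.get?

-- the amino acids B pushes to one ambiguous codon, in table order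
def pvMatchesB (l : List (String × String)) (q : String) : List String :=
  l.filterMap (fun p => if q ∈ pvGeneralizations p.1 then some p.2 else none)

def pvConflictB (l : List (String × String)) (q : String) : Bool :=
  match pvMatchesB l q with
  | [] => false
  | a :: r => r.any (fun x => x != a)

lemma pvBases_single : ∀ b ∈ pvIupacBases, b.toList = [b.toList.headD ' '] := by decide

lemma pvACGT_single : ∀ s ∈ (["A", "C", "G", "T"] : List String),
    s.toList = [s.toList.headD ' '] := by decide

lemma pvPoolACGT : ∀ b ∈ pvIupacBases, ∀ x ∈ pvPool b,
    x ∈ (["A", "C", "G", "T"] : List String) := by decide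

lemma pvStd2amb_keys : pvStd2amb.keys = ["A", "C", "G", "T"] := by decide

lemma pvStd2amb_pool : ∀ b ∈ pvIupacBases, ∀ s ∈ (["A", "C", "G", "T"] : List String),
    (b ∈ pvStd2amb.getD s [] ↔ s ∈ pvPool b) := by decide

lemma pvStd2amb_vals : ∀ s ∈ (["A", "C", "G", "T"] : List String),
    ∀ g ∈ pvStd2amb.getD s [], g ∈ pvIupacBases := by decide

lemma pvCat3_toList (x y z : String) :
    (pvCat3 x y z).toList = x.toList ++ y.toList ++ z.toList := by
  simp [pvCat3, PySem.Str.toList_join, PySem.Chars.join, List.intercalate]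

-- A's codon enumeration is the triple enumeration, joined
lemma pvAllCombinations_eq :
    pvAllCombinations = pvTrips.map (fun t => pvCat3 t.1 t.2.1 t.2.2) := by
  simp [pvAllCombinations, pvTrips, pvProduct, pvCat3, List.map_flatMap, List.map_map,
    Function.comp_def, ← List.map_eq_flatMap]

-- A's expansion of a joined triple of single-character bases is the flattened expansion
lemma pvExpand_triple (b1 b2 b3 : String) (c1 c2 c3 : Char)
    (h1 : b1.toList = [c1]) (h2 : b2.toList = [c2]) (h3 : b3.toList = [c3]) :
    pvExpandAmbiguousCodon (pvCat3 b1 b2 b3) = pvExpB b1 b2 b3 := by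
  have e1 : String.ofList [c1] = b1 := by rw [← h1]; exact String.ofList_toList
  have e2 : String.ofList [c2] = b2 := by rw [← h2]; exact String.ofList_toList
  have e3 : String.ofList [c3] = b3 := by rw [← h3]; exact String.ofList_toList
  unfold pvExpandAmbiguousCodon pvExpB pvPool
  rw [pvCat3_toList, h1, h2, h3]
  simp only [List.cons_append, List.nil_append, List.map_cons, List.map_nil, e1, e2, e3]
  simp [pvProduct, pvCat3, List.map_flatMap, List.map_map, Function.comp_def,
    ← List.map_eq_flatMap]

lemma pvTrips_mem (t : String × String × String) (ht : t ∈ pvTrips) :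
    t.1 ∈ pvIupacBases ∧ t.2.1 ∈ pvIupacBases ∧ t.2.2 ∈ pvIupacBases := by
  unfold pvTrips at ht
  simp only [List.mem_flatMap, List.mem_map] at ht
  obtain ⟨b1, hb1, b2, hb2, b3, hb3, rfl⟩ := ht
  exact ⟨hb1, hb2, hb3⟩

lemma pvMem_expB (b1 b2 b3 c : String) :
    c ∈ pvExpB b1 b2 b3 ↔
      ∃ x ∈ pvPool b1, ∃ y ∈ pvPool b2, ∃ z ∈ pvPool b3, c = pvCat3 x y z := by
  simp [pvExpB, eq_comm]

-- string equality through toList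
lemma pvStr_ext (a b : String) (h : a.toList = b.toList) : a = b := by
  have := congrArg String.ofList h
  rwa [String.ofList_toList, String.ofList_toList] at this

-- joining three single-character strings is injective in each coordinate
lemma pvCat3_inj (a b c a' b' c' : String) (u v w u' v' w' : Char)
    (ha : a.toList = [u]) (hb : b.toList = [v]) (hc : c.toList = [w])
    (ha' : a'.toList = [u']) (hb' : b'.toList = [v']) (hc' : c'.toList = [w'])
    (h : pvCat3 a b c = pvCat3 a' b' c') : a = a' ∧ b = b' ∧ c = c' := by
  have ht := congrArg String.toList h
  rw [pvCat3_toList, pvCat3_toList, ha, hb, hc, ha', hb', hc'] at ht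
  simp only [List.cons_append, List.nil_append, List.cons.injEq, and_true] at ht
  obtain ⟨rfl, rfl, rfl⟩ := ht
  exact ⟨pvStr_ext _ _ (ha.trans ha'.symm), pvStr_ext _ _ (hb.trans hb'.symm),
    pvStr_ext _ _ (hc.trans hc'.symm)⟩

-- every member of an expansion is a 3-character string whose 1-character pieces lie in the pools
lemma pvMemExpB_chars (b1 b2 b3 : String) (h1 : b1 ∈ pvIupacBases) (h2 : b2 ∈ pvIupacBases)
    (h3 : b3 ∈ pvIupacBases) (c : String) (hm : c ∈ pvExpB b1 b2 b3) :
    ∃ x y z : Char, c.toList = [x, y, z] ∧ String.ofList [x] ∈ pvPool b1 ∧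
      String.ofList [y] ∈ pvPool b2 ∧ String.ofList [z] ∈ pvPool b3 := by
  rw [pvMem_expB] at hm
  obtain ⟨px, hpx, py, hpy, pz, hpz, rfl⟩ := hm
  have e1 := pvACGT_single px (pvPoolACGT b1 h1 px hpx)
  have e2 := pvACGT_single py (pvPoolACGT b2 h2 py hpy)
  have e3 := pvACGT_single pz (pvPoolACGT b3 h3 pz hpz)
  refine ⟨px.toList.headD ' ', py.toList.headD ' ', pz.toList.headD ' ', ?_, ?_, ?_, ?_⟩
  · rw [pvCat3_toList, e1, e2, e3]; rfl
  · rw [← e1, String.ofList_toList]; exact hpx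
  · rw [← e2, String.ofList_toList]; exact hpy
  · rw [← e3, String.ofList_toList]; exact hpz

lemma pvMemExpB_of_chars (b1 b2 b3 : String) (c : String) (x y z : Char)
    (hc : c.toList = [x, y, z]) (hx : String.ofList [x] ∈ pvPool b1)
    (hy : String.ofList [y] ∈ pvPool b2) (hz : String.ofList [z] ∈ pvPool b3) :
    c ∈ pvExpB b1 b2 b3 := by
  rw [pvMem_expB]
  refine ⟨_, hx, _, hy, _, hz, ?_⟩
  apply pvStr_ext
  rw [pvCat3_toList, hc]
  simp [String.toList_ofList]

lemma pvContains_std2amb (s : String) :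
    pvStd2amb.contains s = true ↔ s ∈ (["A", "C", "G", "T"] : List String) := by
  rw [PySem.Dict.contains_iff_mem_keys, pvStd2amb_keys]

-- the membership bridge: an ambiguous codon generalizes c  iff  c is one of its expansions
lemma pvMem_gens_iff (b1 b2 b3 : String) (h1 : b1 ∈ pvIupacBases) (h2 : b2 ∈ pvIupacBases)
    (h3 : b3 ∈ pvIupacBases) (c : String) :
    pvCat3 b1 b2 b3 ∈ pvGeneralizations c ↔ c ∈ pvExpB b1 b2 b3 := by
  have hu1 := pvBases_single b1 h1
  have hu2 := pvBases_single b2 h2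
  have hu3 := pvBases_single b3 h3
  by_cases h3len : ∃ x y z : Char, c.toList = [x, y, z]
  · obtain ⟨x, y, z, hc⟩ := h3len
    have hgen : pvGeneralizations c =
        (if pvStd2amb.contains (String.ofList [x]) && pvStd2amb.contains (String.ofList [y]) &&
            pvStd2amb.contains (String.ofList [z]) then
          (pvStd2amb.getD (String.ofList [x]) []).flatMap (fun g1 =>
            (pvStd2amb.getD (String.ofList [y]) []).flatMap (fun g2 =>
              (pvStd2amb.getD (String.ofList [z]) []).map (fun g3 => pvCat3 g1 g2 g3)))
        else []) := by
      unfold pvGeneralizations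
      rw [hc]
    by_cases hk : (pvStd2amb.contains (String.ofList [x]) &&
        pvStd2amb.contains (String.ofList [y]) && pvStd2amb.contains (String.ofList [z])) = true
    · have hk1 : String.ofList [x] ∈ (["A", "C", "G", "T"] : List String) := by
        rw [← pvContains_std2amb]; simp only [Bool.and_eq_true] at hk; exact hk.1.1
      have hk2 : String.ofList [y] ∈ (["A", "C", "G", "T"] : List String) := by
        rw [← pvContains_std2amb]; simp only [Bool.and_eq_true] at hk; exact hk.1.2
      have hk3 : String.ofList [z] ∈ (["A", "C", "G", "T"] : List String) := by
        rw [← pvContains_std2amb]; simp only [Bool.and_eq_true] at hk; exact hk.2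
      rw [hgen, if_pos hk]
      constructor
      · intro hm
        simp only [List.mem_flatMap, List.mem_map] at hm
        obtain ⟨g1, hg1, g2, hg2, g3, hg3, heq⟩ := hm
        have hi1 := pvStd2amb_vals _ hk1 g1 hg1
        have hi2 := pvStd2amb_vals _ hk2 g2 hg2
        have hi3 := pvStd2amb_vals _ hk3 g3 hg3
        obtain ⟨rfl, rfl, rfl⟩ := pvCat3_inj g1 g2 g3 b1 b2 b3 _ _ _ _ _ _
          (pvBases_single g1 hi1) (pvBases_single g2 hi2) (pvBases_single g3 hi3) hu1 hu2 hu3 heq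
        exact pvMemExpB_of_chars _ _ _ c x y z hc
          ((pvStd2amb_pool g1 hi1 _ hk1).mp hg1)
          ((pvStd2amb_pool g2 hi2 _ hk2).mp hg2)
          ((pvStd2amb_pool g3 hi3 _ hk3).mp hg3)
      · intro hm
        obtain ⟨x', y', z', hc', hx', hy', hz'⟩ := pvMemExpB_chars b1 b2 b3 h1 h2 h3 c hm
        rw [hc] at hc'
        obtain ⟨rfl, rfl, rfl⟩ : x = x' ∧ y = y' ∧ z = z' := by
          simpa using hc'
        simp only [List.mem_flatMap, List.mem_map]
        exact ⟨b1, (pvStd2amb_pool b1 h1 _ hk1).mpr hx',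
          b2, (pvStd2amb_pool b2 h2 _ hk2).mpr hy',
          b3, (pvStd2amb_pool b3 h3 _ hk3).mpr hz', rfl⟩
    · rw [hgen, if_neg hk]
      simp only [List.not_mem_nil, false_iff]
      intro hm
      obtain ⟨x', y', z', hc', hx', hy', hz'⟩ := pvMemExpB_chars b1 b2 b3 h1 h2 h3 c hm
      rw [hc] at hc'
      obtain ⟨rfl, rfl, rfl⟩ : x = x' ∧ y = y' ∧ z = z' := by simpa using hc'
      apply hk
      simp only [Bool.and_eq_true]
      exact ⟨⟨(pvContains_std2amb _).mpr (pvPoolACGT b1 h1 _ hx'),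
        (pvContains_std2amb _).mpr (pvPoolACGT b2 h2 _ hy')⟩,
        (pvContains_std2amb _).mpr (pvPoolACGT b3 h3 _ hz')⟩
  · constructor
    · intro hm
      exfalso
      unfold pvGeneralizations at hm
      rcases hc : c.toList with _ | ⟨x, _ | ⟨y, _ | ⟨z, _ | ⟨w, rest⟩⟩⟩⟩ <;>
        rw [hc] at hm <;> first
          | exact absurd hm (List.not_mem_nil)
          | exact h3len ⟨_, _, _, hc⟩
    · intro hm
      exfalso
      obtain ⟨x', y', z', hc', _, _, _⟩ := pvMemExpB_chars b1 b2 b3 h1 h2 h3 c hm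
      exact h3len ⟨_, _, _, hc'⟩

-- A-side: the contains/getD set-building loop is Set.ofList of the matches
lemma pvSetFold (cod : PySem.Dict String String) (l : List String) (s : PySem.Set String) :
    l.foldl (fun s c => if cod.contains c then PySem.Set.add s (cod.getD c "") else s) s
      = (l.filterMap cod.get?).foldl PySem.Set.add s := by
  induction l generalizing s with
  | nil => rfl
  | cons c t ih =>
    simp only [List.foldl_cons, List.filterMap_cons]
    rw [PySem.Dict.contains_eq_isSome_get?, PySem.Dict.getD_eq_get?_getD]
    cases cod.get? c <;> simp [ih]

lemma pvStepA_char (cod : PySem.Dict String String) (acc : PySem.Dict String String)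
    (amb : String) :
    pvStepA cod acc amb =
      (if (PySem.Set.ofList (pvMatchesA cod amb)).length = 1 then
        acc.insert amb ((PySem.Set.ofList (pvMatchesA cod amb)).headD "") else acc) := by
  simp only [pvStepA, pvMatchesA]
  rw [pvSetFold, PySem.Set.ofList_eq_foldl]
  rfl

-- B-side: projections of the inner push loop at a query codon
lemma pvInnerFold_proj (g : List String) (aa : String)
    (st : PySem.Dict String String × PySem.Set String) (q : String) :
    ((g.foldl (pvPush aa) st).1.get? q
        = if q ∈ g then some ((st.1.get? q).getD aa) else st.1.get? q)
    ∧ ((q ∈ (g.foldl (pvPush aa) st).2)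
        ↔ (q ∈ st.2 ∨ (q ∈ g ∧ ∃ v, st.1.get? q = some v ∧ v ≠ aa))) := by
  induction g generalizing st with
  | nil => simp
  | cons h t ih =>
    rw [List.foldl_cons]
    by_cases hq : q = h
    · subst hq
      rcases hv : st.1.get? q with _ | v
      · have hcf : st.1.contains q = false := by
          rw [PySem.Dict.contains_eq_isSome_get?, hv]; rfl
        have hpush : pvPush aa st q = (st.1.insert q aa, st.2) := by
          simp [pvPush, hcf]
        rw [hpush]
        obtain ⟨ihv, ihc⟩ := ih (st.1.insert q aa, st.2)
        refine ⟨?_, ?_⟩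
        · rw [ihv]
          by_cases hqt : q ∈ t <;>
            simp [hqt, PySem.Dict.get?_insert_self]
        · rw [ihc]
          simp [PySem.Dict.get?_insert_self]
      · have hct : st.1.contains q = true := by
          rw [PySem.Dict.contains_eq_isSome_get?, hv]; rfl
        have hgd : st.1.getD q "" = v := by
          rw [PySem.Dict.getD_eq_get?_getD, hv]; rfl
        by_cases hva : v = aa
        · have hpush : pvPush aa st q = st := by
            simp [pvPush, hct, hgd, hva]
          rw [hpush]
          obtain ⟨ihv, ihc⟩ := ih st
          refine ⟨?_, ?_⟩
          · rw [ihv]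
            by_cases hqt : q ∈ t <;> simp [hqt, hv, hva]
          · rw [ihc]
            simp [hv, hva]
        · have hpush : pvPush aa st q = (st.1, PySem.Set.add st.2 q) := by
            simp [pvPush, hct, hgd, hva]
          rw [hpush]
          obtain ⟨ihv, ihc⟩ := ih (st.1, PySem.Set.add st.2 q)
          refine ⟨?_, ?_⟩
          · rw [ihv]
            by_cases hqt : q ∈ t <;> simp [hqt, hv]
          · rw [ihc]
            simp [PySem.Set.mem_add, hv, hva]
    · have hval : (pvPush aa st h).1.get? q = st.1.get? q := by
        unfold pvPush
        split_ifs <;> simp [PySem.Dict.get?_insert_of_ne _ _ hq]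
      have hconf : q ∈ (pvPush aa st h).2 ↔ q ∈ st.2 := by
        unfold pvPush
        split_ifs <;> simp [PySem.Set.mem_add, hq]
      have hconf2 : (pvPush aa st h).2 = (pvPush aa st h).2 := rfl
      obtain ⟨ihv, ihc⟩ := ih (pvPush aa st h)
      refine ⟨?_, ?_⟩
      · rw [ihv, hval]
        by_cases hqt : q ∈ t <;> simp [hqt, hq]
      · rw [ihc, hval, hconf]
        by_cases hqt : q ∈ t <;> simp [hqt, hq]

-- B-side: projections of the whole table pass at a query codon
lemma pvVcProj (l : List (String × String)) (q : String) :
    ((l.foldl (fun st p => (pvGeneralizations p.1).foldl (pvPush p.2) st)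
        (PySem.Dict.empty, PySem.Set.empty)).1.get? q = (pvMatchesB l q).head?)
    ∧ ((q ∈ (l.foldl (fun st p => (pvGeneralizations p.1).foldl (pvPush p.2) st)
        (PySem.Dict.empty, PySem.Set.empty)).2) ↔ pvConflictB l q = true) := by
  induction l using List.reverseRecOn with
  | nil =>
    refine ⟨?_, ?_⟩
    · simp [pvMatchesB, PySem.Dict.get?_empty]
    · simp [pvMatchesB, pvConflictB, PySem.Set.empty]
  | append_singleton l p ih =>
    rw [List.foldl_append, List.foldl_cons, List.foldl_nil]
    obtain ⟨ihv, ihc⟩ := ih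
    obtain ⟨pv, pc⟩ := pvInnerFold_proj (pvGeneralizations p.1) p.2
      (l.foldl (fun st p => (pvGeneralizations p.1).foldl (pvPush p.2) st)
        (PySem.Dict.empty, PySem.Set.empty)) q
    by_cases hg : q ∈ pvGeneralizations p.1
    · have hm : pvMatchesB (l ++ [p]) q = pvMatchesB l q ++ [p.2] := by
        simp [pvMatchesB, List.filterMap_append, hg]
      rw [if_pos hg] at pv
      refine ⟨?_, ?_⟩
      · rw [pv, ihv, hm]
        rcases pvMatchesB l q with _ | ⟨a, r⟩ <;> simp
      · rw [pc, ihv, ihc]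
        rcases hml : pvMatchesB l q with _ | ⟨a, r⟩
        · simp [pvConflictB, hm, hml, hg]
        · have hc2 : pvConflictB (l ++ [p]) q = (r.any (fun x => x != a) || (p.2 != a)) := by
            simp [pvConflictB, hm, hml]
          have hc1 : pvConflictB l q = r.any (fun x => x != a) := by
            simp [pvConflictB, hml]
          rw [hc1, hc2]
          constructor
          · rintro (h | ⟨_, v, hv, hne⟩)
            · simp [h]
            · obtain rfl : a = v := by simpa using hv
              simp [bne_iff_ne, Ne.symm hne]
          · intro h
            rcases Bool.or_eq_true_iff.mp h with h' | h'
            · exact Or.inl h'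
            · exact Or.inr ⟨hg, a, rfl, Ne.symm (bne_iff_ne.mp h')⟩
    · have hm : pvMatchesB (l ++ [p]) q = pvMatchesB l q := by
        simp [pvMatchesB, List.filterMap_append, hg]
      rw [if_neg hg] at pv
      refine ⟨?_, ?_⟩
      · rw [pv, ihv, hm]
      · rw [pc, ihc]
        simp [pvConflictB, hm, hg]

-- a Nodup list whose members are exactly v is [v]
lemma pvEq_singleton (l : List String) (v : String) (hnd : l.Nodup) (hv : v ∈ l)
    (ha : ∀ a ∈ l, a = v) : l = [v] := by
  cases l with
  | nil => cases hv
  | cons a t =>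
    have hav : a = v := ha a (List.mem_cons_self)
    cases t with
    | nil => rw [hav]
    | cons b u =>
      exfalso
      have hbv : b = v := ha b (by simp)
      have : a ∈ b :: u := by rw [hav, ← hbv]; exact List.mem_cons_self
      exact (List.nodup_cons.mp hnd).1 this

-- the two per-codon decisions agree
lemma pvStep_agree (cod : PySem.Dict String String) (hnd : cod.keys.Nodup)
    (acc : PySem.Dict String String) (t : String × String × String) (ht : t ∈ pvTrips) :
    pvStepA cod acc (pvCat3 t.1 t.2.1 t.2.2) =
      (let vc := cod.items.foldl (fun st p => (pvGeneralizations p.1).foldl (pvPush p.2) st)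
          (PySem.Dict.empty, PySem.Set.empty)
       if vc.1.contains (pvCat3 t.1 t.2.1 t.2.2) && !(vc.2.contains (pvCat3 t.1 t.2.1 t.2.2)) then
         acc.insert (pvCat3 t.1 t.2.1 t.2.2) (vc.1.getD (pvCat3 t.1 t.2.1 t.2.2) "")
       else acc) := by
  obtain ⟨h1, h2, h3⟩ := pvTrips_mem t ht
  obtain ⟨b1, b2, b3⟩ := t
  simp only at h1 h2 h3 ⊢
  have hexp : pvExpandAmbiguousCodon (pvCat3 b1 b2 b3) = pvExpB b1 b2 b3 :=
    pvExpand_triple b1 b2 b3 _ _ _ (pvBases_single b1 h1) (pvBases_single b2 h2)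
      (pvBases_single b3 h3)
  have hmemAB : ∀ a, a ∈ pvMatchesA cod (pvCat3 b1 b2 b3) ↔
      a ∈ pvMatchesB cod.items (pvCat3 b1 b2 b3) := by
    intro a
    simp only [pvMatchesA, pvMatchesB, hexp, List.mem_filterMap]
    constructor
    · rintro ⟨c, hcmem, hgc⟩
      refine ⟨(c, a), by apply PySem.Dict.mem_items_of_get?_eq_some <;> assumption, ?_⟩
      rw [if_pos ((pvMem_gens_iff b1 b2 b3 h1 h2 h3 c).mpr hcmem)]
    · rintro ⟨⟨c, v⟩, hmem, hif⟩
      by_cases hgens : pvCat3 b1 b2 b3 ∈ pvGeneralizations c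
      · rw [if_pos hgens] at hif
        obtain rfl : v = a := by simpa using hif
        exact ⟨c, (pvMem_gens_iff b1 b2 b3 h1 h2 h3 c).mp hgens,
          by apply PySem.Dict.get?_of_mem_items <;> assumption⟩
      · rw [if_neg hgens] at hif
        cases hif
  obtain ⟨pv, pc⟩ := pvVcProj cod.items (pvCat3 b1 b2 b3)
  rw [pvStepA_char]
  rcases hml : pvMatchesB cod.items (pvCat3 b1 b2 b3) with _ | ⟨a, r⟩
  · have hm1 : pvMatchesA cod (pvCat3 b1 b2 b3) = [] := by
      rw [List.eq_nil_iff_forall_not_mem]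
      intro a ha
      have := (hmemAB a).mp ha
      rw [hml] at this
      cases this
    have hcf : (cod.items.foldl (fun st p => (pvGeneralizations p.1).foldl (pvPush p.2) st)
        (PySem.Dict.empty, PySem.Set.empty)).1.contains (pvCat3 b1 b2 b3) = false := by
      rw [PySem.Dict.contains_eq_isSome_get?, pv, hml]; rfl
    rw [hm1, hcf]
    simp [PySem.Set.empty]
  · by_cases hall : ∀ x ∈ r, x = a
    · have hSm : PySem.Set.ofList (pvMatchesA cod (pvCat3 b1 b2 b3)) = [a] := by
        refine pvEq_singleton _ a (PySem.Set.nodup_ofList _) ?_ ?_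
        · rw [PySem.Set.mem_ofList]
          exact (hmemAB a).mpr (by rw [hml]; exact List.mem_cons_self)
        · intro x hx
          rw [PySem.Set.mem_ofList] at hx
          have := (hmemAB x).mp hx
          rw [hml] at this
          rw [List.mem_cons] at this
          rcases this with rfl | hxr
          · rfl
          · exact hall x hxr
      have hct : (cod.items.foldl (fun st p => (pvGeneralizations p.1).foldl (pvPush p.2) st)
          (PySem.Dict.empty, PySem.Set.empty)).1.contains (pvCat3 b1 b2 b3) = true := by
        rw [PySem.Dict.contains_eq_isSome_get?, pv, hml]; rfl
      have hgd : (cod.items.foldl (fun st p => (pvGeneralizations p.1).foldl (pvPush p.2) st)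
          (PySem.Dict.empty, PySem.Set.empty)).1.getD (pvCat3 b1 b2 b3) "" = a := by
        rw [PySem.Dict.getD_eq_get?_getD, pv, hml]; rfl
      have hcb : pvConflictB cod.items (pvCat3 b1 b2 b3) = false := by
        simp only [pvConflictB, hml]
        rw [List.any_eq_false]
        intro x hx
        simp [hall x hx]
      have hcc : (cod.items.foldl (fun st p => (pvGeneralizations p.1).foldl (pvPush p.2) st)
          (PySem.Dict.empty, PySem.Set.empty)).2.contains (pvCat3 b1 b2 b3) = false := by
        rcases hb : (cod.items.foldl (fun st p => (pvGeneralizations p.1).foldl (pvPush p.2) st)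
            (PySem.Dict.empty, PySem.Set.empty)).2.contains (pvCat3 b1 b2 b3) with _ | _
        · exact hb
        · exfalso
          have hmem := (PySem.Set.contains_iff _ _).mp hb
          rw [pc] at hmem
          rw [hcb] at hmem
          cases hmem
      rw [hSm, hct, hcc, hgd]
      simp
    · push_neg at hall
      obtain ⟨x, hxr, hxa⟩ := hall
      have hcb : pvConflictB cod.items (pvCat3 b1 b2 b3) = true := by
        simp only [pvConflictB, hml]
        rw [List.any_eq_true]
        exact ⟨x, hxr, by simpa [bne_iff_ne] using hxa⟩
      have hcc : (cod.items.foldl (fun st p => (pvGeneralizations p.1).foldl (pvPush p.2) st)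
          (PySem.Dict.empty, PySem.Set.empty)).2.contains (pvCat3 b1 b2 b3) = true :=
        (PySem.Set.contains_iff _ _).mpr (pc.mpr hcb)
      have hlen : ¬ (PySem.Set.ofList (pvMatchesA cod (pvCat3 b1 b2 b3))).length = 1 := by
        intro hl
        obtain ⟨b, hb⟩ := List.length_eq_one_iff.mp hl
        have hma : a ∈ PySem.Set.ofList (pvMatchesA cod (pvCat3 b1 b2 b3)) := by
          rw [PySem.Set.mem_ofList]
          exact (hmemAB a).mpr (by rw [hml]; exact List.mem_cons_self)
        have hmx : x ∈ PySem.Set.ofList (pvMatchesA cod (pvCat3 b1 b2 b3)) := by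
          rw [PySem.Set.mem_ofList]
          exact (hmemAB x).mpr (by rw [hml]; exact List.mem_cons_of_mem _ hxr)
        rw [hb] at hma hmx
        simp only [List.mem_singleton] at hma hmx
        exact hxa (hmx.trans hma.symm)
      rw [if_neg hlen, hcc]
      simp

-- the two whole folds agree
lemma pvFolds_eq (cod : PySem.Dict String String) (hnd : cod.keys.Nodup) :
    pvAllCombinations.foldl (pvStepA cod) PySem.Dict.empty
      = (let vc := cod.items.foldl (fun st p => (pvGeneralizations p.1).foldl (pvPush p.2) st)
            (PySem.Dict.empty, PySem.Set.empty)
         pvIupacBases.foldl (fun acc b1 =>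
            pvIupacBases.foldl (fun acc b2 =>
              pvIupacBases.foldl (fun acc b3 =>
                if vc.1.contains (pvCat3 b1 b2 b3) && !(vc.2.contains (pvCat3 b1 b2 b3)) then
                  acc.insert (pvCat3 b1 b2 b3) (vc.1.getD (pvCat3 b1 b2 b3) "")
                else acc) acc) acc)
          PySem.Dict.empty) := by
  simp only
  have hB : pvTrips.foldl (fun acc t =>
      (let vc := cod.items.foldl (fun st p => (pvGeneralizations p.1).foldl (pvPush p.2) st)
          (PySem.Dict.empty, PySem.Set.empty)
       if vc.1.contains (pvCat3 t.1 t.2.1 t.2.2) && !(vc.2.contains (pvCat3 t.1 t.2.1 t.2.2)) then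
         acc.insert (pvCat3 t.1 t.2.1 t.2.2) (vc.1.getD (pvCat3 t.1 t.2.1 t.2.2) "")
       else acc)) PySem.Dict.empty
      = pvIupacBases.foldl (fun acc b1 =>
          pvIupacBases.foldl (fun acc b2 =>
            pvIupacBases.foldl (fun acc b3 =>
              if (cod.items.foldl (fun st p => (pvGeneralizations p.1).foldl (pvPush p.2) st)
                  (PySem.Dict.empty, PySem.Set.empty)).1.contains (pvCat3 b1 b2 b3) &&
                 !((cod.items.foldl (fun st p => (pvGeneralizations p.1).foldl (pvPush p.2) st)
                  (PySem.Dict.empty, PySem.Set.empty)).2.contains (pvCat3 b1 b2 b3)) then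
                acc.insert (pvCat3 b1 b2 b3)
                  ((cod.items.foldl (fun st p => (pvGeneralizations p.1).foldl (pvPush p.2) st)
                    (PySem.Dict.empty, PySem.Set.empty)).1.getD (pvCat3 b1 b2 b3) "")
              else acc) acc) acc)
        PySem.Dict.empty := by
    unfold pvTrips
    simp only [List.foldl_flatMap, List.foldl_map]
  rw [pvAllCombinations_eq, List.foldl_map, ← hB]
  exact PySem.List.foldl_congr_mem _ _ _ _ (fun acc t ht => pvStep_agree cod hnd acc t ht)

-- ===== VERDICT (by name: the statement is the Claim_ definition above) =====
theorem add_ambiguous_codons_spec : Claim_equal_add_ambiguous_codons := by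
  intro data verbose _ _
  unfold Spec_add_ambiguous_codons add_ambiguous_codons add_ambiguous_codons_alt
  simp only
  rw [pvFolds_eq _ (PySem.Dict.nodup_keys_ofList _)]
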